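-- pv_equiv track=rewrite | github.com/johntelforduk/alexa-london-bus | bus_stop.py | remove_ssml_tags
-- ===== SOURCE A (Python) =====
-- def remove_ssml_tags(parm_text:str) -> str:
--     """Remove the SSML tags from parm text. The tags are surrounded by <chevrons>."""
--
--     output_text = ''
--     inside_chevrons = False
--     for c in parm_text:
--         if c == '<':
--             inside_chevrons = True
--         elif c == '>':
--             inside_chevrons = False
--         elif not inside_chevrons:
--             output_text += c
--     return output_text
-- ===== SOURCE B (Python) =====
-- def remove_ssml_tags(parm_text: str) -> str:
--     """Remove the SSML tags from parm text. The tags are surrounded by <chevrons>."""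
--     parts = parm_text.split('<')
--     out = parts[0].replace('>', '')
--     for seg in parts[1:]:
--         i = seg.find('>')
--         if i != -1:
--             out += seg[i + 1:].replace('>', '')
--     return out
-- ===== Notes on version B (the rewrite author's own statement) =====
-- stated objective: faster
-- what changed: Replaced the per-character boolean state machine with a segment-level pass: split the text on '<', keep the first segment (with '>' removed), and for each later segment keep only the part after its first '>' (again with '>' removed); the per-character Python loop is replaced by C-level split/find/replace calls.
import Mathlib
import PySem

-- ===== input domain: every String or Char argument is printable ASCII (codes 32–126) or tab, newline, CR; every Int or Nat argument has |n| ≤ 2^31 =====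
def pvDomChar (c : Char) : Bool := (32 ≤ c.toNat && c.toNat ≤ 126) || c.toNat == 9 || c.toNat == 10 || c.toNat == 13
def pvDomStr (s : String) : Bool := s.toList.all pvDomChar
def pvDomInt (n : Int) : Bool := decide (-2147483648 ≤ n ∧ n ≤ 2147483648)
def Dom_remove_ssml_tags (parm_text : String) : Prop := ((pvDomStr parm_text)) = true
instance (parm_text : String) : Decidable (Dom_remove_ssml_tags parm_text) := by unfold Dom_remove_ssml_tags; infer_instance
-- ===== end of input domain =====

-- B replaces A's per-character boolean state machine by a segment-level pass
-- (split on '<', per-segment find/slice/replace); same output, measured faster in Python (C-level string ops).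


-- ===== PORT A =====
-- A: one pass with a boolean 'inside_chevrons' flag; output accumulated left to right.
def remove_ssml_tags (parm_text : String) : String :=
  let r := parm_text.toList.foldl
    (fun (st : List Char × Bool) c =>
      if c == '<' then (st.1, true)
      else if c == '>' then (st.1, false)
      else if !st.2 then (st.1 ++ [c], st.2)
      else st)
    ([], false)
  String.mk r.1

-- ===== PORT B =====
-- B: split on '<'; keep parts[0] with '>' removed; from each later segment keep
-- the part after its first '>' (with '>' removed), or nothing if it has none.
def remove_ssml_tags_alt (parm_text : String) : String :=
  let parts := PySem.Chars.splitOn parm_text.toList ['<']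
  let out0 := PySem.Chars.replace parts.headI ['>'] []  -- parts[0]: splitOn is never empty
  let out := (parts.drop 1).foldl
    (fun acc seg =>
      let i := PySem.Chars.find seg ['>']
      if i ≠ -1 then acc ++ PySem.Chars.replace (PySem.List.slice seg (some (i + 1)) none) ['>'] [] else acc)
    out0
  String.mk out

-- ===== PRECONDITION & SPEC =====
def Spec_remove_ssml_tags (parm_text : String) (out : String) : Prop := out = remove_ssml_tags_alt parm_text
instance (parm_text : String) (out : String) : Decidable (Spec_remove_ssml_tags parm_text out) := by unfold Spec_remove_ssml_tags; infer_instance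

-- ===== CLAIM (what is proved, stated in full; the proofs are below) =====
def Claim_equal_remove_ssml_tags : Prop := ∀ (parm_text : String), Dom_remove_ssml_tags parm_text → Spec_remove_ssml_tags parm_text (remove_ssml_tags parm_text)

-- ===== LEMMAS AND PROOFS =====

-- A's loop as a structural recursion on the character list (state = inside_chevrons).
def aRun : Bool → List Char → List Char
  | _, [] => []
  | ins, c :: cs =>
    if c == '<' then aRun true cs
    else if c == '>' then aRun false cs
    else if !ins then c :: aRun ins cs
    else aRun ins cs

-- the value of s.split('<') as a structural recursion on the character list
def split1 : List Char → List (List Char)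
  | [] => [[]]
  | c :: cs =>
    if c = '<' then [] :: split1 cs
    else match split1 cs with
      | [] => [[c]]          -- unreachable: split1 is never empty
      | h :: r => (c :: h) :: r

-- remainder of a segment after its first '>' ([] if it has none)
def dropTag : List Char → List Char
  | [] => []
  | c :: cs => if c = '>' then cs else dropTag cs

def filtGt (l : List Char) : List Char := l.filter (fun c => !(c == '>'))

-- what one tail segment contributes to B's output
def contrib (seg : List Char) : List Char :=
  if '>' ∈ seg then filtGt (dropTag seg) else []

-- ---- A side: the foldl computes aRun ----
theorem foldA (cs : List Char) (out : List Char) (ins : Bool) :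
    (cs.foldl
      (fun (st : List Char × Bool) c =>
        if c == '<' then (st.1, true)
        else if c == '>' then (st.1, false)
        else if !st.2 then (st.1 ++ [c], st.2)
        else st) (out, ins)).1 = out ++ aRun ins cs := by
  induction cs generalizing out ins with
  | nil => simp [aRun]
  | cons c cs ih =>
    by_cases h1 : c = '<'
    · simpa [h1, aRun] using ih out true
    · by_cases h2 : c = '>'
      · simpa [h1, h2, aRun] using ih out false
      · cases ins with
        | false => simpa [h1, h2, aRun] using ih (out ++ [c]) false
        | true => simpa [h1, h2, aRun] using ih out true

-- ---- replace with single-char old is filter ----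
theorem rep_go (l acc : List Char) (fuel : Nat) (h : l.length ≤ fuel) :
    PySem.Chars.replace.go ['>'] [] fuel l acc = acc.reverse ++ filtGt l := by
  induction l generalizing acc fuel with
  | nil => cases fuel <;> simp [PySem.Chars.replace.go, filtGt]
  | cons c t ih =>
    cases fuel with
    | zero => simp at h
    | succ f =>
      by_cases hc : c = '>'
      · simpa [PySem.Chars.replace.go, hc, filtGt] using ih acc f (by simpa using h)
      · have hc' : ¬('>' = c) := fun hx => hc hx.symm
        have := ih (c :: acc) f (by simpa using Nat.le_of_succ_le_succ h)
        simp [PySem.Chars.replace.go, hc, hc', filtGt] at this ⊢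
        simpa [List.append_assoc] using this

theorem rep_eq_filtGt (l : List Char) :
    PySem.Chars.replace l ['>'] [] = filtGt l := by
  simpa using rep_go l [] l.length le_rfl

-- ---- splitOn '<' is split1 ----
def consHead (pre : List Char) : List (List Char) → List (List Char)
  | [] => [pre]
  | h :: r => (pre ++ h) :: r

-- split1 is never empty
theorem split1_ne_nil (s : List Char) : split1 s ≠ [] := by
  cases s with
  | nil => simp [split1]
  | cons c t =>
    simp only [split1]
    split
    · simp
    · cases hs : split1 t <;> simp

theorem split_go (l : List Char) (cur : List Char) (acc : List (List Char)) (fuel : Nat)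
    (h : l.length < fuel) :
    PySem.Chars.splitOn.go ['<'] fuel l cur acc = acc.reverse ++ consHead cur.reverse (split1 l) := by
  induction l generalizing cur acc fuel with
  | nil =>
    cases fuel with
    | zero => simp at h
    | succ f => simp [PySem.Chars.splitOn.go, split1, consHead]
  | cons c t ih =>
    cases fuel with
    | zero => simp at h
    | succ f =>
      by_cases hc : c = '<'
      · have := ih [] (cur.reverse :: acc) f (by simpa using Nat.lt_of_succ_lt_succ h)
        simp [PySem.Chars.splitOn.go, hc, List.isPrefixOf] at this ⊢
        rw [this]
        cases hs : split1 t with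
        | nil => exact absurd hs (split1_ne_nil t)
        | cons sh sr => simp [split1, hs, consHead]
      · have hc' : ¬('<' = c) := fun hx => hc hx.symm
        have := ih (c :: cur) acc f (Nat.lt_of_succ_lt_succ h)
        have hpre : (['<'].isPrefixOf (c :: t)) = false := by
          simp [List.isPrefixOf, hc']
        simp [PySem.Chars.splitOn.go, hpre] at this ⊢
        rw [this]
        cases hs : split1 t with
        | nil => exact absurd hs (split1_ne_nil t)
        | cons sh sr => simp [split1, hs, hc, consHead]

theorem splitOn_eq_split1 (s : List Char) :
    PySem.Chars.splitOn s ['<'] = split1 s := by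
  have hgo := split_go s [] [] (s.length + 1) (Nat.lt_succ_self _)
  unfold PySem.Chars.splitOn
  rw [hgo]
  cases hs : split1 s with
  | nil => exact absurd hs (split1_ne_nil s)
  | cons h r => simp [consHead]

-- ---- per-segment: B's find/slice/replace computes contrib ----
theorem dropTag_spec (seg : List Char) (k : Nat)
    (h1 : ['>'] <+: seg.drop k) (h2 : ∀ j < k, ¬ ['>'] <+: seg.drop j) :
    seg.drop (k + 1) = dropTag seg ∧ '>' ∈ seg := by
  induction seg generalizing k with
  | nil => simp [List.prefix_iff_eq_take] at h1
  | cons c t ih =>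
    cases k with
    | zero =>
      rcases h1 with ⟨rest, hr⟩
      simp at hr
      obtain ⟨hc, _⟩ := hr
      subst hc
      simp [dropTag]
    | succ k =>
      have hc : c ≠ '>' := by
        intro hc
        exact h2 0 (Nat.succ_pos _) (by simp [hc])
      have h1' : ['>'] <+: t.drop k := by simpa using h1
      have h2' : ∀ j < k, ¬ ['>'] <+: t.drop j := by
        intro j hj hpre
        exact h2 (j + 1) (by omega) (by simpa using hpre)
      obtain ⟨ha, hb⟩ := ih k h1' h2'
      refine ⟨by simpa [dropTag, hc] using ha, by simp [hb]⟩

theorem seg_contrib (seg : List Char) :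
    (if PySem.Chars.find seg ['>'] ≠ -1 then
        PySem.Chars.replace (PySem.List.slice seg (some (PySem.Chars.find seg ['>'] + 1)) none) ['>'] []
      else ([] : List Char)) = contrib seg := by
  by_cases h : PySem.Chars.find seg ['>'] = -1
  · have : ¬ ['>'] <:+: seg := (PySem.Chars.find_eq_neg_one_iff _ _).1 h
    have hmem : '>' ∉ seg := by
      intro hm
      exact this ((List.singleton_infix_iff '>' seg).2 hm)
    simp [h, contrib, hmem]
  · have hpos : 0 ≤ PySem.Chars.find seg ['>'] := by
      rcases lt_or_ge (PySem.Chars.find seg ['>']) 0 with hlt | hge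
      · exact absurd (by have := PySem.Chars.neg_one_le_find seg ['>']; omega) h
      · exact hge
    obtain ⟨hpre, hmin⟩ := PySem.Chars.find_spec (s := seg) (sub := ['>']) hpos
    obtain ⟨ha, hb⟩ := dropTag_spec seg (PySem.Chars.find seg ['>']).toNat hpre hmin
    have hslice : PySem.List.slice seg (some (PySem.Chars.find seg ['>'] + 1)) none
        = seg.drop ((PySem.Chars.find seg ['>']).toNat + 1) := by
      rw [PySem.List.slice_from (xs := seg) (a := PySem.Chars.find seg ['>'] + 1) (by omega)]
      congr 1
      omega
    rw [if_pos h, hslice, ha, rep_eq_filtGt, contrib, if_pos hb]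

-- ---- the main correspondence: aRun vs split1 segments ----
def allContrib (l : List (List Char)) : List Char := l.foldr (fun s acc => contrib s ++ acc) []

theorem aRun_split1 (cs : List Char) :
    aRun false cs = filtGt (split1 cs).headI ++ allContrib (split1 cs).tail
      ∧ aRun true cs = allContrib (split1 cs) := by
  induction cs with
  | nil => simp [aRun, split1, filtGt, allContrib, contrib]
  | cons c t ih =>
    obtain ⟨ihF, ihT⟩ := ih
    by_cases h1 : c = '<'
    · constructor <;> simp [aRun, split1, h1, allContrib, contrib, filtGt, ihT]
    · by_cases h2 : c = '>'
      · cases hs : split1 t with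
        | nil => exact absurd hs (split1_ne_nil t)
        | cons sh sr =>
          constructor
          · simp [aRun, split1, h2, hs, filtGt, allContrib] at ihF ⊢
            exact ihF
          · simp [aRun, split1, h2, hs, allContrib, contrib, dropTag, filtGt] at ihF ⊢
            exact ihF
      · have h1' : ¬('<' = c) := fun hx => h1 hx.symm
        have h2' : ¬('>' = c) := fun hx => h2 hx.symm
        cases hs : split1 t with
        | nil => exact absurd hs (split1_ne_nil t)
        | cons sh sr =>
          constructor
          · simp [aRun, split1, h1, h2, hs, filtGt] at ihF ⊢
            exact ihF
          · simp [aRun, split1, h1, h2, h2', hs, allContrib, contrib, dropTag] at ihT ⊢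
            exact ihT

-- B's per-segment loop collects the contributions
theorem foldB (r : List (List Char)) (acc : List Char) :
    r.foldl
      (fun acc seg =>
        if PySem.Chars.find seg ['>'] ≠ -1 then
          acc ++ PySem.Chars.replace (PySem.List.slice seg (some (PySem.Chars.find seg ['>'] + 1)) none) ['>'] []
        else acc) acc = acc ++ allContrib r := by
  induction r generalizing acc with
  | nil => simp [allContrib]
  | cons seg rest ih =>
    have hseg := seg_contrib seg
    by_cases h : PySem.Chars.find seg ['>'] = -1
    · rw [List.foldl_cons, if_neg (not_not_intro h), ih]
      have hc : contrib seg = [] := by rw [← hseg, if_neg (not_not_intro h)]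
      simp [allContrib, hc]
    · rw [List.foldl_cons, if_pos h, ih]
      have hc : PySem.Chars.replace (PySem.List.slice seg (some (PySem.Chars.find seg ['>'] + 1)) none) ['>'] []
          = contrib seg := by rw [← hseg, if_pos h]
      simp [allContrib, hc]

-- ===== VERDICT (by name: the statement is the Claim_ definition above) =====
theorem remove_ssml_tags_spec : Claim_equal_remove_ssml_tags := by
  intro s _
  show remove_ssml_tags s = remove_ssml_tags_alt s
  unfold remove_ssml_tags remove_ssml_tags_alt
  simp only []
  rw [foldA, splitOn_eq_split1]
  cases hs : split1 s.toList with
  | nil => exact absurd hs (split1_ne_nil _)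
  | cons h r =>
    have hmain := (aRun_split1 s.toList).1
    rw [hs] at hmain
    simp only [List.headI, List.tail] at hmain
    rw [hmain]
    simp only [List.headI, List.drop_succ_cons, List.drop_zero]
    rw [rep_eq_filtGt, foldB]
    simp
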